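-- pv_equiv track=rewrite | github.com/brenoASantana/uerj | maratona_18_semana_ime/divisaoHeranca.py | count_subsets_sum_div3
-- ===== SOURCE A (Python) =====
-- MOD = 1_000_007
--
-- def count_subsets_sum_div3(nums):
--     """Conta subconjuntos não vazios com soma divisível por 3, em módulo MOD."""
--     dp = [1, 0, 0]  # começa com o subconjunto vazio: soma ≡ 0
--     for x in nums:
--         r = x % 3
--         a0, a1, a2 = dp  # snapshot antes de atualizar
--         # começamos com as opções de 'não pegar x'
--         new0, new1, new2 = a0, a1, a2
--         # agora adicionamos as opções de 'pegar x'
--         if r == 0: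
--             new0 = (new0 + a0) % MOD
--             new1 = (new1 + a1) % MOD
--             new2 = (new2 + a2) % MOD
--         elif r == 1:
--             new1 = (new1 + a0) % MOD
--             new2 = (new2 + a1) % MOD
--             new0 = (new0 + a2) % MOD
--         else:  # r == 2
--             new2 = (new2 + a0) % MOD
--             new0 = (new0 + a1) % MOD
--             new1 = (new1 + a2) % MOD
--         dp = [new0, new1, new2]
--
--     # remove o subconjunto vazio
--     return (dp[0] - 1) % MOD
-- ===== SOURCE B (Python) =====
-- MOD = 1_000_007
--
-- def count_subsets_sum_div3(nums):
--     """Conta subconjuntos não vazios com soma divisível por 3, em módulo MOD."""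
--     # Closed form via residue counts (roots-of-unity filter), no per-element DP.
--     n = len(nums)
--     c0 = sum(1 for x in nums if x % 3 == 0)
--     d = sum(1 if x % 3 == 1 else -1 for x in nums if x % 3 != 0)
--     m = [2, 1, -1, -2, -1, 1][d % 6]
--     inv3 = (MOD + 1) // 3  # modular inverse of 3 (3 * inv3 = MOD + 1)
--     total_with_empty = (pow(2, n, MOD) + pow(2, c0, MOD) * m) * inv3 % MOD
--     return (total_with_empty - 1) % MOD
-- ===== Notes on version B (the rewrite author's own statement) =====
-- stated objective: alternative
-- what changed: Replaces A's per-element 3-state mod-MOD DP by a closed-form roots-of-unity-filter formula: count residues mod 3 in one pass, pick a sign factor from a 6-entry table indexed by (c1-c2) mod 6, and combine 2^n and 2^c0 with the modular inverse of 3.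
import Mathlib
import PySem

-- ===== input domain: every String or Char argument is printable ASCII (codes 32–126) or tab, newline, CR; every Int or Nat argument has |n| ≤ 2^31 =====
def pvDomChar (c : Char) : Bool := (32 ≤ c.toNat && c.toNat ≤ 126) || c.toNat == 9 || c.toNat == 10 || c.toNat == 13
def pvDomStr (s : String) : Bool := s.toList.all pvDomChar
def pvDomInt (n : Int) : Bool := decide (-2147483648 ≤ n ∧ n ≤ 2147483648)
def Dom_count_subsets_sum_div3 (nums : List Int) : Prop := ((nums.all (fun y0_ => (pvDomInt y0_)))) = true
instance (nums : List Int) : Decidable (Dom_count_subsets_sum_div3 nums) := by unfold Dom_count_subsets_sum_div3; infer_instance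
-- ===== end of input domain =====

-- B replaces A's per-element 3-state DP by a closed-form roots-of-unity-filter formula over residue
-- counts (objective: alternative; same asymptotic cost, different algorithm).

def pvMOD : Int := 1000007

-- ===== PORT A =====
def pvStepA (dp : Int × Int × Int) (x : Int) : Int × Int × Int :=
  let r := PySem.Int.mod x 3
  let a0 := dp.1; let a1 := dp.2.1; let a2 := dp.2.2
  if r == 0 then
    (PySem.Int.mod (a0 + a0) pvMOD, PySem.Int.mod (a1 + a1) pvMOD, PySem.Int.mod (a2 + a2) pvMOD)
  else if r == 1 then
    (PySem.Int.mod (a0 + a2) pvMOD, PySem.Int.mod (a1 + a0) pvMOD, PySem.Int.mod (a2 + a1) pvMOD)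
  else
    (PySem.Int.mod (a0 + a1) pvMOD, PySem.Int.mod (a1 + a2) pvMOD, PySem.Int.mod (a2 + a0) pvMOD)

def count_subsets_sum_div3 (nums : List Int) : Int :=
  let dp := nums.foldl pvStepA (1, 0, 0)
  PySem.Int.mod (dp.1 - 1) pvMOD

-- ===== PORT B =====
-- step of the residue-difference sum  d = sum(1 if x%3==1 else -1 for x in nums if x%3 != 0)
def pvDF (acc x : Int) : Int :=
  if PySem.Int.mod x 3 == 0 then acc else acc + (if PySem.Int.mod x 3 == 1 then 1 else -1)

def count_subsets_sum_div3_alt (nums : List Int) : Int :=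
  let n : Nat := nums.length
  let c0 : Nat := (nums.filter (fun x => PySem.Int.mod x 3 == 0)).length
  let d : Int := nums.foldl pvDF 0
  let m : Int := PySem.List.pyGetD ([2, 1, -1, -2, -1, 1] : List Int) (PySem.Int.mod d 6) 0
  let inv3 : Int := PySem.Int.floordiv (pvMOD + 1) 3
  let totalWithEmpty : Int :=
    PySem.Int.mod ((PySem.Int.powMod 2 n pvMOD + PySem.Int.powMod 2 c0 pvMOD * m) * inv3) pvMOD
  PySem.Int.mod (totalWithEmpty - 1) pvMOD

-- ===== PRECONDITION & SPEC =====
def Spec_count_subsets_sum_div3 (nums : List Int) (out : Int) : Prop := out = count_subsets_sum_div3_alt nums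
instance (nums : List Int) (out : Int) : Decidable (Spec_count_subsets_sum_div3 nums out) := by unfold Spec_count_subsets_sum_div3; infer_instance

-- ===== CLAIM (what is proved, stated in full; the proofs are below) =====
def Claim_equal_count_subsets_sum_div3 : Prop := ∀ (nums : List Int), Dom_count_subsets_sum_div3 nums → Spec_count_subsets_sum_div3 nums (count_subsets_sum_div3 nums)

-- ===== LEMMAS AND PROOFS =====

-- Exact (un-reduced) version of A's DP step, for the invariant proofs.
def pvStepG (g : Int × Int × Int) (x : Int) : Int × Int × Int :=
  let r := PySem.Int.mod x 3
  if r == 0 then (g.1 + g.1, g.2.1 + g.2.1, g.2.2 + g.2.2)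
  else if r == 1 then (g.1 + g.2.2, g.2.1 + g.1, g.2.2 + g.2.1)
  else (g.1 + g.2.1, g.2.1 + g.2.2, g.2.2 + g.1)

def pvG (nums : List Int) : Int × Int × Int := nums.foldl pvStepG (1, 0, 0)

-- the three sign tables of the roots-of-unity filter, one per residue class of the sum
def pvM (tab : List Int) (d : Int) : Int := PySem.List.pyGetD tab (PySem.Int.mod d 6) 0
def pvTab0 : List Int := [2, 1, -1, -2, -1, 1]
def pvTab1 : List Int := [-1, 1, 2, 1, -1, -2]
def pvTab2 : List Int := [-1, -2, -1, 1, 2, 1]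

def pvC0 (nums : List Int) : Nat := (nums.filter (fun x => PySem.Int.mod x 3 == 0)).length
def pvD (nums : List Int) : Int := nums.foldl pvDF 0

lemma pvMod3 (x : Int) : PySem.Int.mod x 3 = x % 3 :=
  PySem.Int.mod_eq_emod_of_pos (by norm_num)

lemma pvModM (a : Int) : PySem.Int.mod a pvMOD = a % 1000007 := by
  rw [show pvMOD = 1000007 from rfl]
  exact PySem.Int.mod_eq_emod_of_pos (by norm_num)

-- A's mod-reduced fold tracks the exact fold componentwise mod pvMOD
lemma pvA_mod (xs : List Int) : ∀ g : Int × Int × Int,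
    xs.foldl pvStepA (g.1 % 1000007, g.2.1 % 1000007, g.2.2 % 1000007) =
      ((xs.foldl pvStepG g).1 % 1000007, (xs.foldl pvStepG g).2.1 % 1000007,
        (xs.foldl pvStepG g).2.2 % 1000007) := by
  induction xs with
  | nil => intro g; rfl
  | cons x xs ih =>
    intro g
    have hstep : pvStepA (g.1 % 1000007, g.2.1 % 1000007, g.2.2 % 1000007) x =
        ((pvStepG g x).1 % 1000007, (pvStepG g x).2.1 % 1000007, (pvStepG g x).2.2 % 1000007) := by
      simp only [pvStepA, pvStepG, pvModM]
      split_ifs <;> refine Prod.ext ?_ (Prod.ext ?_ ?_) <;> simp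
    simpa [List.foldl, hstep] using ih (pvStepG g x)

-- the exact steps commute (they are commuting linear maps)
lemma pvStepG_comm (g : Int × Int × Int) (x y : Int) :
    pvStepG (pvStepG g x) y = pvStepG (pvStepG g y) x := by
  simp only [pvStepG, pvMod3]
  have hx : x % 3 = 0 ∨ x % 3 = 1 ∨ x % 3 = 2 := by omega
  have hy : y % 3 = 0 ∨ y % 3 = 1 ∨ y % 3 = 2 := by omega
  rcases hx with hx | hx | hx <;> rcases hy with hy | hy | hy <;>
    simp [hx, hy] <;> refine ⟨by ring, by ring, by ring⟩

lemma pvG_peel (xs : List Int) : ∀ (g : Int × Int × Int) (x : Int),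
    xs.foldl pvStepG (pvStepG g x) = pvStepG (xs.foldl pvStepG g) x := by
  induction xs with
  | nil => intro g x; rfl
  | cons y xs ih =>
    intro g x
    calc (y :: xs).foldl pvStepG (pvStepG g x)
        = xs.foldl pvStepG (pvStepG (pvStepG g x) y) := rfl
      _ = xs.foldl pvStepG (pvStepG (pvStepG g y) x) := by rw [pvStepG_comm]
      _ = pvStepG (xs.foldl pvStepG (pvStepG g y)) x := ih _ _
      _ = pvStepG ((y :: xs).foldl pvStepG g) x := rfl

lemma pvD_shift (xs : List Int) : ∀ a : Int, xs.foldl pvDF a = a + pvD xs := by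
  induction xs with
  | nil => intro a; simp [pvD]
  | cons x xs ih =>
    intro a
    have hcons : pvD (x :: xs) = pvDF 0 x + pvD xs := by
      show List.foldl pvDF (pvDF 0 x) xs = _
      exact ih _
    show List.foldl pvDF (pvDF a x) xs = a + pvD (x :: xs)
    rw [ih, hcons]
    unfold pvDF
    split_ifs <;> ring

lemma pvMod6 (x : Int) : PySem.Int.mod x 6 = x % 6 :=
  PySem.Int.mod_eq_emod_of_pos (by norm_num)

-- table recurrences: moving d by ±1 matches the exact DP step on the three components
lemma pvM_cases (d : Int) : PySem.Int.mod d 6 = 0 ∨ PySem.Int.mod d 6 = 1 ∨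
    PySem.Int.mod d 6 = 2 ∨ PySem.Int.mod d 6 = 3 ∨ PySem.Int.mod d 6 = 4 ∨
    PySem.Int.mod d 6 = 5 := by
  rw [pvMod6]; omega

lemma pvM_succ (d : Int) :
    pvM pvTab0 (d + 1) = pvM pvTab0 d + pvM pvTab2 d ∧
    pvM pvTab1 (d + 1) = pvM pvTab1 d + pvM pvTab0 d ∧
    pvM pvTab2 (d + 1) = pvM pvTab2 d + pvM pvTab1 d := by
  have h := pvM_cases d
  unfold pvM pvTab0 pvTab1 pvTab2
  simp only [pvMod6] at h ⊢
  rcases h with h | h | h | h | h | h <;>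
    rw [show (d + 1) % 6 = (d % 6 + 1) % 6 by omega, h] <;> decide

lemma pvM_pred (d : Int) :
    pvM pvTab0 (d - 1) = pvM pvTab0 d + pvM pvTab1 d ∧
    pvM pvTab1 (d - 1) = pvM pvTab1 d + pvM pvTab2 d ∧
    pvM pvTab2 (d - 1) = pvM pvTab2 d + pvM pvTab0 d := by
  have h := pvM_cases d
  unfold pvM pvTab0 pvTab1 pvTab2
  simp only [pvMod6] at h ⊢
  rcases h with h | h | h | h | h | h <;>
    rw [show (d - 1) % 6 = (d % 6 + 5) % 6 by omega, h] <;> decide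

-- the closed form: 3 · (exact DP) = 2^n + 2^c0 · (table value at d mod 6), componentwise
lemma pvClosed (xs : List Int) :
    3 * (pvG xs).1 = 2 ^ xs.length + 2 ^ pvC0 xs * pvM pvTab0 (pvD xs) ∧
    3 * (pvG xs).2.1 = 2 ^ xs.length + 2 ^ pvC0 xs * pvM pvTab1 (pvD xs) ∧
    3 * (pvG xs).2.2 = 2 ^ xs.length + 2 ^ pvC0 xs * pvM pvTab2 (pvD xs) := by
  induction xs with
  | nil => decide
  | cons x xs ih =>
    obtain ⟨ih0, ih1, ih2⟩ := ih
    have hG : pvG (x :: xs) = pvStepG (pvG xs) x := by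
      simpa [pvG, List.foldl] using pvG_peel xs (1, 0, 0) x
    have hD : pvD (x :: xs) = pvDF 0 x + pvD xs := by
      show List.foldl pvDF (pvDF 0 x) xs = _
      exact pvD_shift xs _
    have hx : x % 3 = 0 ∨ x % 3 = 1 ∨ x % 3 = 2 := by omega
    rcases hx with hx | hx | hx
    · -- residue 0: c0 grows, d unchanged, every component doubles
      have hc : pvC0 (x :: xs) = pvC0 xs + 1 := by
        simp [pvC0, pvMod3, hx, Nat.add_comm]
      rw [hG, hD]
      simp only [pvStepG, pvDF, pvMod3, hx, hc]
      norm_num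
      have p1 : (2:Int) ^ (xs.length + 1) = 2 ^ xs.length * 2 := pow_succ 2 xs.length
      have p2 : (2:Int) ^ (pvC0 xs + 1) = 2 ^ pvC0 xs * 2 := pow_succ 2 (pvC0 xs)
      refine ⟨?_, ?_, ?_⟩ <;> simp only [p1, p2] <;>
        [linear_combination 2 * ih0; linear_combination 2 * ih1; linear_combination 2 * ih2]
    · -- residue 1: d grows by 1
      have hc : pvC0 (x :: xs) = pvC0 xs := by
        simp [pvC0, pvMod3, hx]
      rw [hG, hD]
      simp only [pvStepG, pvDF, pvMod3, hx, hc]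
      norm_num
      obtain ⟨m0, m1, m2⟩ := pvM_succ (pvD xs)
      rw [show (1:Int) + pvD xs = pvD xs + 1 by ring, m0, m1, m2]
      have p1 : (2:Int) ^ (xs.length + 1) = 2 ^ xs.length * 2 := pow_succ 2 xs.length
      refine ⟨?_, ?_, ?_⟩ <;> simp only [p1] <;>
        [linear_combination ih0 + ih2; linear_combination ih1 + ih0; linear_combination ih2 + ih1]
    · -- residue 2: d drops by 1
      have hc : pvC0 (x :: xs) = pvC0 xs := by
        simp [pvC0, pvMod3, hx]
      rw [hG, hD]
      simp only [pvStepG, pvDF, pvMod3, hx, hc]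
      norm_num
      obtain ⟨m0, m1, m2⟩ := pvM_pred (pvD xs)
      rw [show (-1:Int) + pvD xs = pvD xs - 1 by ring, m0, m1, m2]
      have p1 : (2:Int) ^ (xs.length + 1) = 2 ^ xs.length * 2 := pow_succ 2 xs.length
      refine ⟨?_, ?_, ?_⟩ <;> simp only [p1] <;>
        [linear_combination ih0 + ih1; linear_combination ih1 + ih2; linear_combination ih2 + ih0]

-- ===== VERDICT (by name: the statement is the Claim_ definition above) =====
theorem count_subsets_sum_div3_spec : Claim_equal_count_subsets_sum_div3 := by
  intro nums _
  unfold Spec_count_subsets_sum_div3 count_subsets_sum_div3 count_subsets_sum_div3_alt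
  dsimp only
  have hA := pvA_mod nums (1, 0, 0)
  norm_num at hA
  have hC := (pvClosed nums).1
  -- notation
  set n := nums.length
  set c0 := pvC0 nums with hc0
  set d := pvD nums with hd
  set m := pvM pvTab0 d with hm
  have hG : (nums.foldl pvStepA (1, 0, 0)).1 = (pvG nums).1 % 1000007 := by
    rw [hA]; rfl
  rw [hG]
  simp only [PySem.Int.powMod_eq, pvModM]
  have hinv : PySem.Int.floordiv (pvMOD + 1) 3 = 333336 := by decide
  rw [hinv]
  rw [show List.foldl pvDF 0 nums = d from rfl,
    show (List.filter (fun x => PySem.Int.mod x 3 == 0) nums).length = c0 from rfl,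
    show PySem.List.pyGetD ([2, 1, -1, -2, -1, 1] : List Int) (PySem.Int.mod d 6) 0 = m from rfl]
  congr 2
  set G0 := (pvG nums).1 with hG0
  have e1 : Int.ModEq 1000007 ((2:Int) ^ n % 1000007) ((2:Int) ^ n) :=
    Int.emod_emod_of_dvd _ dvd_rfl
  have e2 : Int.ModEq 1000007 ((2:Int) ^ c0 % 1000007) ((2:Int) ^ c0) :=
    Int.emod_emod_of_dvd _ dvd_rfl
  have e3 := ((e1.add (e2.mul_right m)).mul_right 333336)
  calc G0 % 1000007
      = (G0 + 1000007 * G0) % 1000007 := by rw [Int.add_mul_emod_self_left]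
    _ = ((2 ^ n + 2 ^ c0 * m) * 333336) % 1000007 := by
        congr 1; rw [show (2:Int) ^ n + 2 ^ c0 * m = 3 * G0 from hC.symm]; ring
    _ = ((2 ^ n % 1000007 + 2 ^ c0 % 1000007 * m) * 333336) % 1000007 := e3.symm  -- hA : foldl pvStepA (1,0,0) = (triple of mods)
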